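-- pv_equiv track=rewrite | github.com/981377660LMT/algorithm-study | 11_动态规划/背包问题/0_01背包/习题/3685. 含上限元素的子序列和-bitset优化可行性01背包问题.py | subsequenceSumAfterCapping
-- ===== SOURCE A (Python) =====
-- from typing import List
--
-- def subsequenceSumAfterCapping(nums: List[int], k: int) -> List[bool]:
--     nums.sort()
--     n = len(nums)
--     res = [False] * n
--     dp = 1
--     mask = (1 << (k + 1)) - 1
--     ptr = 0
--     for x in range(1, n + 1):
--         while ptr < n and nums[ptr] == x:
--             dp |= (dp << x) & mask
--             ptr += 1
--
--         # 从大于x的数中选了j个x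
--         for j in range(1 + min(n - ptr, k // x)):
--             if dp >> (k - x * j) & 1:
--                 res[x - 1] = True
--                 break
--     return res
-- ===== SOURCE B (Python) =====
-- def subsequenceSumAfterCapping(nums, k):
--     nums.sort()
--     n = len(nums)
--     # the ascending run of values in [1, n]: exactly the elements ever taken at
--     # their exact value; everything after it only ever counts as a capped element
--     small = []
--     for v in nums:
--         if not (1 <= v <= n):
--             break
--         small.append(v)
--     INF = n + 1
--     # minCap[s] = smallest cap x such that sum s is a subset sum of the small
--     # elements of value <= x; INF if unreachable (minCap[0] = 0).  Sums beyond
--     # sum(small) are unreachable, so the table stops at m = min(k, sum(small)).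
--     m = min(k, sum(small))
--     minCap = [0] + [INF] * m          # == [0] when m < 0 (never indexed then)
--     for v in small:
--         minCap = [v if s >= v and c == INF and minCap[s - v] != INF else c
--                   for s, c in enumerate(minCap)]
--     res = []
--     for x in range(1, n + 1):
--         big = n - sum(1 for v in small if v <= x)   # elements capped down to x
--         res.append(any(k - x * j <= m and minCap[k - x * j] <= x
--                        for j in range(1 + min(big, k // x))))
--     return res
-- ===== Notes on version B (the rewrite author's own statement) =====
-- stated objective: alternative
-- what changed: Replaces A's interleaved bitset DP (a big-int dp grown while answering, queried with shifts inside the answer loop) by a staged algorithm: extract the usable ascending run once, build a single static integer table minCap[s] = smallest cap at which sum s becomes reachable (bounded by min(k, sum of usable elements)), then answer every cap x by counting capped elements and pure table lookups; Pre_ excludes k <= -2, where A raises ValueError (negative shift count in `1 << (k+1)`).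
import Mathlib
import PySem

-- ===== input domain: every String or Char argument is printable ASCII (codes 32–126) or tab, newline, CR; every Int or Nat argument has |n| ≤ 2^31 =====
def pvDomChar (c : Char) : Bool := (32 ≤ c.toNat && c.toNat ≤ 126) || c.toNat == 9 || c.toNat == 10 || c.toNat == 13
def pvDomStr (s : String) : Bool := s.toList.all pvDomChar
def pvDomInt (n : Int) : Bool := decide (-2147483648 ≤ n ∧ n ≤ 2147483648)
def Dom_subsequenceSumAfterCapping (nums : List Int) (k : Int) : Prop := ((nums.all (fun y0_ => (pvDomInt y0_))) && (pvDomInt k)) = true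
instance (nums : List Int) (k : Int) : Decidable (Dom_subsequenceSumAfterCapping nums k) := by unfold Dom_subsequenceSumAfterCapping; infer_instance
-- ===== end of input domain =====

-- B replaces A's interleaved bitset subset-sum DP by a staged computation: it first
-- extracts the usable ascending run, then builds one static integer table minCap[s]
-- (the smallest cap at which sum s becomes reachable), and answers every cap by pure
-- lookups; objective: alternative. Both Pythons sort `nums` in place (the same
-- observable mutation); the equivalence proved here is about the return value.

-- ===== PORT A =====
-- `for j in range(...): if dp >> (k - x*j) & 1: res[x-1] = True; break` — the break chain.
-- (k - x*j) ≥ 0 on every executed iteration under Pre_ (j ≤ k//x, x ≥ 1), so .toNat is exact.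
def pvCheckA (dp : Nat) (k x : Int) : List Int → Bool
  | [] => false
  | j :: rest => if dp.testBit (k - x * j).toNat then true else pvCheckA dp k x rest

-- `while ptr < n and nums[ptr] == x: dp |= (dp << x) & mask; ptr += 1`
-- fuel = len(nums) bounds the iterations (ptr strictly increases below len(nums));
-- the shift amount x comes from range(1, n+1), so x ≥ 1 and x.toNat is exact.
def pvWhileA (nums : List Int) (x : Int) (mask : Nat) : Nat → Nat → Nat → Nat × Nat
  | 0, dp, ptr => (dp, ptr)
  | fuel + 1, dp, ptr =>
    if h : ptr < nums.length then
      if nums[ptr] = x then pvWhileA nums x mask fuel (dp ||| ((dp <<< x.toNat) &&& mask)) (ptr + 1)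
      else (dp, ptr)
    else (dp, ptr)

-- the body of `for x in range(1, n + 1)`, over the state (res, dp, ptr)
def pvBodyA (sorted : List Int) (k : Int) (mask : Nat) (st : List Bool × Nat × Nat) (x : Int) :
    List Bool × Nat × Nat :=
  let n := sorted.length
  let w := pvWhileA sorted x mask n st.2.1 st.2.2
  let cnt : Int := 1 + min ((n : Int) - (w.2 : Int)) (PySem.Int.floordiv k x)
  let res := if pvCheckA w.1 k x (PySem.List.pyRange 0 cnt 1) then st.1.set (x - 1).toNat true
             else st.1
  (res, w.1, w.2)

def subsequenceSumAfterCapping (nums : List Int) (k : Int) : List Bool :=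
  let sorted := PySem.List.sorted nums (fun v => v) false   -- nums.sort()
  let n := sorted.length
  -- mask = (1 << (k+1)) - 1; exact for k ≥ -1 (Pre_); Python raises ValueError for k ≤ -2
  let mask := (1 <<< (k + 1).toNat) - 1
  ((PySem.List.pyRange 1 ((n : Int) + 1) 1).foldl (pvBodyA sorted k mask)
    (List.replicate n false, 1, 0)).1

-- ===== PORT B =====
-- `for v in nums: if not (1 <= v <= n): break; small.append(v)` — the break loop
def pvSmall (n : Int) : List Int → List Int
  | [] => []
  | v :: rest => if 1 ≤ v ∧ v ≤ n then v :: pvSmall n rest else []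

-- one round of `minCap = [v if s >= v and c == INF and minCap[s - v] != INF else c
--                          for s, c in enumerate(minCap)]` (reads only the OLD list)
def pvRelax (inf : Int) (mc : List Int) (v : Int) : List Int :=
  (PySem.List.enumerate mc 0).map (fun sc =>
    if v ≤ sc.1 ∧ sc.2 = inf ∧ PySem.List.pyGetD mc (sc.1 - v) 0 ≠ inf then v else sc.2)

-- `any(k - x*j <= m and minCap[k - x*j] <= x for j in range(1 + min(big, k // x)))`
def pvFlagB (minCap : List Int) (k m x big : Int) : Bool :=
  (PySem.List.pyRange 0 (1 + min big (PySem.Int.floordiv k x)) 1).any (fun j =>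
    decide (k - x * j ≤ m) && decide (PySem.List.pyGetD minCap (k - x * j) 0 ≤ x))

def subsequenceSumAfterCapping_alt (nums : List Int) (k : Int) : List Bool :=
  let sorted := PySem.List.sorted nums (fun v => v) false   -- nums.sort()
  let n := sorted.length
  let small := pvSmall (n : Int) sorted
  let inf : Int := (n : Int) + 1
  let m : Int := min k small.sum
  let minCap := small.foldl (pvRelax inf) ((0 : Int) :: List.replicate m.toNat inf)
  (PySem.List.pyRange 1 ((n : Int) + 1) 1).foldl (fun res x =>
    let big : Int := (n : Int) - small.foldl (fun acc v => if v ≤ x then acc + 1 else acc) 0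
    res ++ [pvFlagB minCap k m x big]) []

-- ===== PRECONDITION & SPEC =====
-- Pre_ excludes k ≤ -2, where A raises ValueError at `mask = (1 << (k+1)) - 1` (negative shift).
def Pre_subsequenceSumAfterCapping (nums : List Int) (k : Int) : Prop := -1 ≤ k
instance (nums : List Int) (k : Int) : Decidable (Pre_subsequenceSumAfterCapping nums k) := by
  unfold Pre_subsequenceSumAfterCapping; infer_instance

def pvWitness_subsequenceSumAfterCapping : List Int × Int := ([1, 2, 1], 3)

def Spec_subsequenceSumAfterCapping (nums : List Int) (k : Int) (out : List Bool) : Prop :=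
  out = subsequenceSumAfterCapping_alt nums k
instance (nums : List Int) (k : Int) (out : List Bool) : Decidable (Spec_subsequenceSumAfterCapping nums k out) := by
  unfold Spec_subsequenceSumAfterCapping; infer_instance

-- ===== CLAIM (what is proved, stated in full; the proofs are below) =====
def Claim_equal_subsequenceSumAfterCapping : Prop :=
  ∀ (nums : List Int) (k : Int), Dom_subsequenceSumAfterCapping nums k →
    Pre_subsequenceSumAfterCapping nums k →
    Spec_subsequenceSumAfterCapping nums k (subsequenceSumAfterCapping nums k)

-- ===== LEMMAS AND PROOFS =====

-- s is a subset sum of ws (processed left to right)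
def pvReach : List Int → Int → Bool
  | [], s => decide (s = 0)
  | v :: ws, s => pvReach ws s || pvReach ws (s - v)

theorem pvReach_append (ws : List Int) (v s : Int) :
    pvReach (ws ++ [v]) s = (pvReach ws s || pvReach ws (s - v)) := by
  induction ws generalizing s with
  | nil => rfl
  | cons w ws ih =>
    simp only [List.cons_append, pvReach, ih]
    have h : s - w - v = s - v - w := by ring
    rw [h]
    ac_rfl

theorem pvReach_bound (ws : List Int) (s : Int) (hws : ∀ w ∈ ws, 1 ≤ w)
    (h : pvReach ws s = true) : 0 ≤ s ∧ s ≤ ws.sum := by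
  induction ws generalizing s with
  | nil => simp [pvReach] at h; simp [h]
  | cons w ws ih =>
    have hw : 1 ≤ w := hws w (by simp)
    have hws' : ∀ u ∈ ws, 1 ≤ u := fun u hu => hws u (by simp [hu])
    simp only [pvReach, Bool.or_eq_true] at h
    rcases h with h | h
    · have := ih s hws' h; simp only [List.sum_cons]; omega
    · have := ih (s - w) hws' h; simp only [List.sum_cons]; omega

theorem pvSmall_eq_takeWhile (n : Int) (L : List Int) :
    pvSmall n L = L.takeWhile (fun v => decide (1 ≤ v ∧ v ≤ n)) := by
  induction L with
  | nil => rfl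
  | cons v L ih =>
    by_cases h : 1 ≤ v ∧ v ≤ n
    · rw [List.takeWhile_cons_of_pos (by simpa using h)]
      simp only [pvSmall, if_pos h, ih]
    · rw [List.takeWhile_cons_of_neg (by simpa using h)]
      simp only [pvSmall, if_neg h]

theorem checkA_eq_any (dp : Nat) (k x : Int) (js : List Int) :
    pvCheckA dp k x js = js.any (fun j => dp.testBit (k - x * j).toNat) := by
  induction js with
  | nil => rfl
  | cons j rest ih =>
    simp only [pvCheckA, List.any_cons, ih]
    split_ifs with h <;> simp [h]

-- the while loop consumes exactly the leading run of x's and steps dp once per element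
theorem whileA_run (L : List Int) (x : Int) (mask : Nat) (fuel dp p : Nat)
    (hfuel : L.length ≤ fuel + p) :
    pvWhileA L x mask fuel dp p =
      (((L.drop p).takeWhile (fun v => v == x)).foldl
          (fun d (_ : Int) => d ||| ((d <<< x.toNat) &&& mask)) dp,
        p + ((L.drop p).takeWhile (fun v => v == x)).length) := by
  induction fuel generalizing dp p with
  | zero =>
    have : L.drop p = [] := List.drop_eq_nil_of_le (by omega)
    simp [pvWhileA, this]
  | succ fuel ih =>
    simp only [pvWhileA]
    split
    · rename_i hp
      rw [List.drop_eq_getElem_cons hp]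
      split
      · rename_i hx
        rw [List.takeWhile_cons_of_pos (by simp [hx])]
        rw [ih _ (p + 1) (by omega)]
        simp only [List.foldl_cons, List.length_cons]
        rw [Prod.mk.injEq]
        exact ⟨rfl, by omega⟩
      · rename_i hx
        rw [List.takeWhile_cons_of_neg (by simpa using hx)]
        simp
    · rename_i hp
      have : L.drop p = [] := List.drop_eq_nil_of_le (by omega)
      simp [this]

-- one bitset step preserves the reachability reading of the bits (k ≥ 0, K = k.toNat)
theorem dpStep_inv (K : Nat) (v : Int) (hv : 1 ≤ v) (ws : List Int) (hws : ∀ w ∈ ws, 1 ≤ w)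
    (dp : Nat) (hinv : ∀ t : Nat, dp.testBit t = (decide (t ≤ K) && pvReach ws (t : Int))) :
    ∀ t : Nat, (dp ||| ((dp <<< v.toNat) &&& (2 ^ (K + 1) - 1))).testBit t =
      (decide (t ≤ K) && pvReach (ws ++ [v]) (t : Int)) := by
  intro t
  rw [pvReach_append]
  by_cases hvt : v ≤ (t : Int)
  · have hc : ((t - v.toNat : Nat) : Int) = (t : Int) - v := by omega
    have e2 : dp.testBit (t - v.toNat) = (decide (t - v.toNat ≤ K) && pvReach ws ((t : Int) - v)) := by
      rw [hinv (t - v.toNat), hc]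
    by_cases htK : t ≤ K
    · simp [Nat.testBit_or, Nat.testBit_and, Nat.testBit_shiftLeft,
        Nat.testBit_two_pow_sub_one, hinv, e2, htK,
        show v.toNat ≤ t by omega, show t < K + 1 by omega, show t - v.toNat ≤ K by omega,
        show max v 0 = v by omega]
    · simp [Nat.testBit_or, Nat.testBit_and, Nat.testBit_shiftLeft,
        Nat.testBit_two_pow_sub_one, hinv, htK, show ¬ (t < K + 1) by omega]
  · have h2 : pvReach ws ((t : Int) - v) = false := by
      by_contra h
      have := pvReach_bound ws _ hws (by simpa using h)
      omega
    simp [Nat.testBit_or, Nat.testBit_and, Nat.testBit_shiftLeft,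
      Nat.testBit_two_pow_sub_one, hinv, h2, show ¬ (v.toNat ≤ t) by omega]

theorem dpFold_inv (K : Nat) (run : List Int) (hrun : ∀ w ∈ run, 1 ≤ w)
    (ws : List Int) (hws : ∀ w ∈ ws, 1 ≤ w) (dp : Nat)
    (hinv : ∀ t : Nat, dp.testBit t = (decide (t ≤ K) && pvReach ws (t : Int))) :
    ∀ t : Nat, (run.foldl (fun d v => d ||| ((d <<< v.toNat) &&& (2 ^ (K + 1) - 1))) dp).testBit t =
      (decide (t ≤ K) && pvReach (ws ++ run) (t : Int)) := by
  induction run generalizing ws dp with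
  | nil => simpa using hinv
  | cons v run ih =>
    have hv : 1 ≤ v := hrun v (by simp)
    have h1 := dpStep_inv K v hv ws hws dp hinv
    have h2 := ih (fun w hw => hrun w (by simp [hw])) (ws ++ [v])
      (by intro w hw; rcases List.mem_append.1 hw with h | h
          · exact hws w h
          · simp at h; omega) _ h1
    intro t
    simpa using h2 t

-- sorted-list bookkeeping ------------------------------------------------------

theorem sorted_filter_eq_takeWhile (S : List Int) (hS : S.Pairwise (· ≤ ·)) (x : Int) :
    S.filter (fun v => decide (v ≤ x)) = S.takeWhile (fun v => decide (v ≤ x)) := by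
  induction S with
  | nil => rfl
  | cons a S ih =>
    rcases List.pairwise_cons.1 hS with ⟨ha, hS'⟩
    by_cases h : a ≤ x
    · simp [List.filter_cons, List.takeWhile_cons, h, ih hS']
    · have : S.filter (fun v => decide (v ≤ x)) = [] := by
        rw [List.filter_eq_nil_iff]
        intro b hb
        have := ha b hb
        simp; omega
      simp [List.filter_cons, List.takeWhile_cons, h, this]

theorem sorted_filter_eq_takeWhile_eq (S : List Int) (hS : S.Pairwise (· ≤ ·)) (x : Int)
    (hlb : ∀ v ∈ S, x ≤ v) :
    S.filter (fun v => decide (v ≤ x)) = S.takeWhile (fun v => v == x) := by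
  induction S with
  | nil => rfl
  | cons b S ih =>
    rcases List.pairwise_cons.1 hS with ⟨hb, hS'⟩
    have hxb : x ≤ b := hlb b (by simp)
    by_cases h : b = x
    · subst h
      simp only [List.filter_cons, List.takeWhile_cons]
      have : (b == b) = true := by simp
      simp only [this, decide_eq_true_eq, if_pos (le_refl b), if_true]
      rw [ih hS' (fun v hv => hb v hv)]
    · have hbx : ¬ b ≤ x := by omega
      have : S.filter (fun v => decide (v ≤ x)) = [] := by
        rw [List.filter_eq_nil_iff]
        intro c hc
        have := hb c hc; simp; omega
      simp [List.filter_cons, List.takeWhile_cons, hbx, h, this,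
        show (b == x) = false by simp [h]]

-- the new elements at cap m+1 are exactly the leading (m+1)-run after the ≤m prefix
theorem sorted_filter_succ (S : List Int) (hS : S.Pairwise (· ≤ ·)) (m : Int) :
    S.filter (fun v => decide (v ≤ m + 1)) =
      S.filter (fun v => decide (v ≤ m)) ++
        (S.dropWhile (fun v => decide (v ≤ m))).takeWhile (fun v => v == m + 1) := by
  induction S with
  | nil => rfl
  | cons a S ih =>
    rcases List.pairwise_cons.1 hS with ⟨ha, hS'⟩
    by_cases h1 : a ≤ m
    · simp [List.filter_cons, List.dropWhile_cons, h1, show a ≤ m + 1 by omega, ih hS']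
    · rw [List.dropWhile_cons_of_neg (by simpa using h1)]
      have hfm : (a :: S).filter (fun v => decide (v ≤ m)) = [] := by
        rw [List.filter_eq_nil_iff]
        intro c hc
        rcases List.mem_cons.1 hc with h | h
        · subst h; simp; omega
        · have := ha c h; simp; omega
      rw [hfm, List.nil_append]
      by_cases h2 : a = m + 1
      · subst h2
        rw [List.takeWhile_cons_of_pos (by simp)]
        rw [List.filter_cons_of_pos (by simp)]
        rw [sorted_filter_eq_takeWhile_eq S hS' (m + 1) (fun v hv => ha v hv)]
      · have h3 : ¬ a ≤ m + 1 := by omega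
        rw [List.takeWhile_cons_of_neg (by simp [h2])]
        rw [List.filter_cons_of_neg (by simpa using h3)]
        rw [List.filter_eq_nil_iff.2 (by intro c hc; have := ha c hc; simp; omega)]

-- minCap table ------------------------------------------------------------------

theorem pvRelax_length (inf : Int) (mc : List Int) (v : Int) :
    (pvRelax inf mc v).length = mc.length := by
  simp [pvRelax, PySem.List.length_enumerate]

theorem pvRelax_getElem (inf : Int) (mc : List Int) (v : Int) (s : Nat)
    (h : s < (pvRelax inf mc v).length) :
    (pvRelax inf mc v)[s] =
      if v ≤ (s : Int) ∧ mc[s]'(by rw [pvRelax_length] at h; exact h) = inf ∧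
          PySem.List.pyGetD mc ((s : Int) - v) 0 ≠ inf then v
      else mc[s]'(by rw [pvRelax_length] at h; exact h) := by
  have hs : s < (PySem.List.enumerate mc 0).length := by
    rw [PySem.List.length_enumerate]; rw [pvRelax_length] at h; exact h
  simp only [pvRelax, List.getElem_map, PySem.List.getElem_enumerate mc 0 s hs, zero_add]

-- the invariant carried along B's relaxation fold
def pvInv (n : Int) (M : Nat) (done mc : List Int) : Prop :=
  mc.length = M + 1 ∧
  (∀ e ∈ mc, e = n + 1 ∨ (0 ≤ e ∧ (e = 0 ∨ e ∈ done))) ∧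
  (∀ s : Nat, s ≤ M → ∀ x : Int, 1 ≤ x → x ≤ n →
    (mc.getD s 0 ≤ x ↔ pvReach (done.filter (fun v => decide (v ≤ x))) (s : Int) = true))

theorem pvInv_init (n : Int) (M : Nat) (hn : 0 ≤ n) :
    pvInv n M [] ((0 : Int) :: List.replicate M (n + 1)) := by
  refine ⟨by simp, ?_, ?_⟩
  · intro e he
    rcases List.mem_cons.1 he with h | h
    · right; omega
    · left; exact List.eq_of_mem_replicate h
  · intro s hs x hx hxn
    cases s with
    | zero =>
      refine ⟨fun _ => ?_, fun _ => ?_⟩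
      · simp [pvReach]
      · simp only [List.getD_cons_zero]; omega
    | succ s =>
      have hgd : ((0 : Int) :: List.replicate M (n + 1)).getD (s + 1) 0 = n + 1 := by
        simp only [List.getD_cons_succ]
        rw [List.getD_eq_getElem?_getD, List.getElem?_replicate]
        rw [if_pos (show s < M by omega)]
        rfl
      rw [hgd]
      simp only [List.filter_nil, pvReach]
      constructor
      · intro h; omega
      · intro h; simp at h; omega

theorem pvInv_step (n : Int) (M : Nat) (done mc : List Int) (v : Int)
    (hinv : pvInv n M done mc)
    (hv : 1 ≤ v ∧ v ≤ n) (hdone : ∀ w ∈ done, 1 ≤ w ∧ w ≤ v) :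
    pvInv n M (done ++ [v]) (pvRelax (n + 1) mc v) := by
  obtain ⟨hlen, hent, hiff⟩ := hinv
  have hlen' : (pvRelax (n + 1) mc v).length = M + 1 := by rw [pvRelax_length, hlen]
  refine ⟨hlen', ?_, ?_⟩
  · intro e he
    rw [List.mem_iff_getElem] at he
    obtain ⟨s, hs, he⟩ := he
    rw [pvRelax_getElem] at he
    split at he
    · right; subst he; refine ⟨by omega, Or.inr (by simp)⟩
    · subst he
      have := hent (mc[s]'(by rw [hlen'] at hs; omega)) (by
        exact List.getElem_mem _)
      rcases this with h | ⟨h0, h1⟩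
      · left; exact h
      · right; refine ⟨h0, ?_⟩
        rcases h1 with h | h
        · exact Or.inl h
        · exact Or.inr (by simp [h])
  · intro s hs x hx hxn
    have hsl : s < mc.length := by omega
    have hsl' : s < (pvRelax (n + 1) mc v).length := by omega
    have hgd : (pvRelax (n + 1) mc v).getD s 0 = (pvRelax (n + 1) mc v)[s] := by
      rw [List.getD_eq_getElem?_getD, List.getElem?_eq_getElem hsl']; rfl
    have hgd0 : mc.getD s 0 = mc[s] := by
      rw [List.getD_eq_getElem?_getD, List.getElem?_eq_getElem hsl]; rfl
    -- rewrite the filter over done ++ [v]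
    rw [List.filter_append]
    have hinf_gt : ∀ y : Int, y ≤ n → ¬ (n + 1 ≤ y) := by intro y h1 h2; omega
    -- every element of done is ≤ v
    have hdone_le : ∀ w ∈ done, w ≤ v := fun w hw => (hdone w hw).2
    rw [hgd, pvRelax_getElem _ _ _ _ hsl']
    by_cases hvx : v ≤ x
    · -- v is kept by the filter at x; done is kept entirely wherever it was
      have hfv : [v].filter (fun w => decide (w ≤ x)) = [v] := by simp [hvx]
      have hfd : done.filter (fun w => decide (w ≤ x)) = done := by
        rw [List.filter_eq_self]; intro w hw; simp [le_trans (hdone_le w hw) hvx]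
      rw [hfv, hfd, pvReach_append]
      -- the x = n instance of the old invariant reads "≠ INF ↔ reachable from done"
      have hfdn : done.filter (fun w => decide (w ≤ n)) = done := by
        rw [List.filter_eq_self]; intro w hw
        simp [le_trans (hdone_le w hw) hv.2]
      have hiff_n : ∀ t : Nat, t ≤ M → (mc.getD t 0 ≤ n ↔ pvReach done (t : Int) = true) := by
        intro t ht
        have := hiff t ht n (by omega) (le_refl n)
        rwa [hfdn] at this
      have hiff_x : mc.getD s 0 ≤ x ↔ pvReach done (s : Int) = true := by
        have := hiff s hs x hx hxn
        rwa [hfd] at this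
      split
      · rename_i hupd
        obtain ⟨hvs, hinfs, hrest⟩ := hupd
        have hneq : mc.getD (s - v.toNat) 0 ≠ n + 1 := by
          have hcast : (s : Int) - v = ((s - v.toNat : Nat) : Int) := by omega
          rw [hcast] at hrest
          rwa [PySem.List.pyGetD_natCast] at hrest
        -- entries are ≤ n or = n+1, so ≠ n+1 means reachable
        have hsub : s - v.toNat ≤ M := by omega
        have hsubl : s - v.toNat < mc.length := by omega
        have hmem := hent (mc[s - v.toNat]'hsubl) (List.getElem_mem _)
        have hgds : mc.getD (s - v.toNat) 0 = mc[s - v.toNat]'hsubl := by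
          rw [List.getD_eq_getElem?_getD, List.getElem?_eq_getElem hsubl]; rfl
        have hle_n : mc.getD (s - v.toNat) 0 ≤ n := by
          rw [hgds] at hneq ⊢
          rcases hmem with h | ⟨h0, h1⟩
          · exact absurd h hneq
          · rcases h1 with h | h
            · omega
            · have := (hdone (mc[s - v.toNat]'hsubl) h).2; omega
        have hreach := (hiff_n _ hsub).1 hle_n
        have hcast : ((s - v.toNat : Nat) : Int) = (s : Int) - v := by omega
        rw [hcast] at hreach
        simp [hvx, hreach]
      · rename_i hupd
        push_neg at hupd
        by_cases hinfs : mc[s]'hsl = n + 1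
        · -- unreachable so far; and the (s-v) entry is INF or v > s
          have hms : mc.getD s 0 = n + 1 := by rw [hgd0, hinfs]
          have hlhs : ¬ mc[s]'hsl ≤ x := by rw [← hgd0] at hinfs; omega
          have hr1 : pvReach done (s : Int) = false := by
            by_contra h
            have := (hiff_x).2 (by simpa using h)
            omega
          have hr2 : pvReach done ((s : Int) - v) = false := by
            by_cases hvs : v ≤ (s : Int)
            · have hrest := hupd hvs hinfs
              have hcast : (s : Int) - v = ((s - v.toNat : Nat) : Int) := by omega
              rw [hcast] at hrest
              rw [PySem.List.pyGetD_natCast] at hrest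
              have hsub : s - v.toNat ≤ M := by omega
              by_contra h
              have := (hiff_n _ hsub).2 (by
                rw [← hcast]; simpa using h)
              omega
            · by_contra h
              have := pvReach_bound done _ (fun w hw => (hdone w hw).1) (by simpa using h)
              omega
          simp [hlhs, hr1, hr2]
        · -- already stamped: entry ≤ v ≤ x, reachable from done alone
          have hle : mc[s]'hsl ≤ v := by
            have hmem := hent (mc[s]'hsl) (List.getElem_mem _)
            rcases hmem with h | ⟨h0, h1⟩
            · exact absurd h hinfs
            · rcases h1 with h | h
              · omega
              · exact (hdone _ h).2
          have : mc.getD s 0 ≤ x := by rw [hgd0]; omega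
          have hreach := hiff_x.1 this
          rw [hgd0] at this
          simp [this, hreach]
    · -- v dropped by the filter: nothing changes at cap x
      have hfv : [v].filter (fun w => decide (w ≤ x)) = [] := by simp; omega
      rw [hfv, List.append_nil]
      have := hiff s hs x hx hxn
      rw [← this, hgd0]
      split
      · rename_i hupd
        -- updated entry is v > x; old entry was n+1 > x
        have : mc[s]'hsl = n + 1 := hupd.2.1
        constructor
        · intro h; omega
        · intro h; omega
      · exact Iff.rfl

theorem pvInv_fold (n : Int) (M : Nat) (rest done mc : List Int)
    (hinv : pvInv n M done mc)
    (hpair : (done ++ rest).Pairwise (· ≤ ·))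
    (hmem : ∀ w ∈ done ++ rest, 1 ≤ w ∧ w ≤ n) :
    pvInv n M (done ++ rest) (rest.foldl (pvRelax (n + 1)) mc) := by
  induction rest generalizing done mc with
  | nil => simpa using hinv
  | cons v rest ih =>
    have hv : 1 ≤ v ∧ v ≤ n := hmem v (by simp)
    have hdone : ∀ w ∈ done, 1 ≤ w ∧ w ≤ v := by
      intro w hw
      refine ⟨(hmem w (by simp [hw])).1, ?_⟩
      have := List.pairwise_append.1 hpair
      exact this.2.2 w hw v (by simp)
    have hstep := pvInv_step n M done mc v hinv hv hdone
    have hpair' : ((done ++ [v]) ++ rest).Pairwise (· ≤ ·) := by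
      simpa [List.append_assoc] using hpair
    have hmem' : ∀ w ∈ (done ++ [v]) ++ rest, 1 ≤ w ∧ w ≤ n := by
      intro w hw; apply hmem; simpa [List.append_assoc] using hw
    have := ih (done ++ [v]) _ hstep hpair' hmem'
    simpa [List.append_assoc] using this

-- per-cap flag equality ---------------------------------------------------------

theorem flag_eq (n k : Int) (S : List Int) (hS : ∀ w ∈ S, 1 ≤ w ∧ w ≤ n)
    (mc : List Int) (hk : 0 ≤ k)
    (hinv : pvInv n (min k S.sum).toNat S mc)
    (x : Int) (hx : 1 ≤ x) (hxn : x ≤ n) (dp : Nat)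
    (hdp : ∀ t : Nat, dp.testBit t =
      (decide (t ≤ k.toNat) && pvReach (S.filter (fun v => decide (v ≤ x))) (t : Int)))
    (a : Int) :
    pvCheckA dp k x (PySem.List.pyRange 0 (1 + min a (PySem.Int.floordiv k x)) 1) =
      (PySem.List.pyRange 0 (1 + min a (PySem.Int.floordiv k x)) 1).any (fun j =>
        decide (k - x * j ≤ min k S.sum) && decide (PySem.List.pyGetD mc (k - x * j) 0 ≤ x)) := by
  obtain ⟨hlen, hent, hiff⟩ := hinv
  rw [checkA_eq_any]
  apply PySem.List.any_congr_mem
  intro j hj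
  obtain ⟨hj0, hjlt⟩ := (PySem.List.mem_pyRange_one).1 hj
  have hjle : j ≤ PySem.Int.floordiv k x := by omega
  have hmul : j * x ≤ k := (PySem.Int.le_floordiv_iff_mul_le (by omega)).1 hjle
  have h0 : 0 ≤ k - x * j := by rw [mul_comm] at hmul; omega
  have hsk : (k - x * j) ≤ k := by nlinarith
  set s : Int := k - x * j with hs
  have hcast : ((s.toNat : Nat) : Int) = s := Int.toNat_of_nonneg h0
  rw [hdp]
  have h1 : decide (s.toNat ≤ k.toNat) = true := by simp; omega
  rw [h1, Bool.true_and, hcast]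
  have hSfilt : ∀ w ∈ S.filter (fun v => decide (v ≤ x)), 1 ≤ w :=
    fun w hw => (hS w (List.mem_of_mem_filter hw)).1
  by_cases hsm : s ≤ min k S.sum
  · have h2 : decide (s ≤ min k S.sum) = true := by simp [hsm]
    rw [h2, Bool.true_and]
    have hiffx := hiff s.toNat (by omega) x hx hxn
    rw [hcast] at hiffx
    have hgd : PySem.List.pyGetD mc s 0 = mc.getD s.toNat 0 := by
      rw [← hcast, PySem.List.pyGetD_natCast, Int.toNat_natCast]
    rw [hgd]
    rw [Bool.eq_iff_iff]
    simp only [decide_eq_true_eq]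
    exact hiffx.symm
  · -- s exceeds every achievable sum: both sides false
    have h2 : decide (s ≤ min k S.sum) = false := by simp [hsm]
    rw [h2, Bool.false_and]
    have hfsum : (S.filter (fun v => decide (v ≤ x))).sum ≤ S.sum :=
      List.Sublist.sum_le_sum List.filter_sublist (fun w hw => by
        have := (hS w hw).1; omega)
    by_contra h
    have := pvReach_bound _ s hSfilt (by simpa using h)
    omega

-- the outer fold -----------------------------------------------------------------

def pvCnt (L : List Int) (m : Int) : Nat :=
  ((pvSmall (L.length : Int) L).filter (fun v => decide (v ≤ m))).length

def pvFlagB' (L : List Int) (k : Int) (mc : List Int) (x : Int) : Bool :=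
  pvFlagB mc k (min k (pvSmall (L.length : Int) L).sum) x
    ((L.length : Int) - (pvSmall (L.length : Int) L).foldl
      (fun acc v => if v ≤ x then acc + 1 else acc) 0)

theorem small_mem (L : List Int) (w : Int) (hw : w ∈ pvSmall (L.length : Int) L) :
    1 ≤ w ∧ w ≤ (L.length : Int) := by
  rw [pvSmall_eq_takeWhile] at hw
  simpa using List.mem_takeWhile_imp hw

theorem small_pairwise (L : List Int) (hL : L.Pairwise (· ≤ ·)) :
    (pvSmall (L.length : Int) L).Pairwise (· ≤ ·) := by
  rw [pvSmall_eq_takeWhile]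
  exact List.Pairwise.sublist (List.takeWhile_sublist _) hL

theorem testBit_one' (t : Nat) : Nat.testBit 1 t = decide (t = 0) := by
  cases t with
  | zero => decide
  | succ u => simp [Nat.testBit_succ]

-- the while loop's run through L is the (m+1)-run of the small prefix
theorem run_eq (L : List Int) (hL : L.Pairwise (· ≤ ·)) (m : Int)
    (hx1 : 1 ≤ m + 1) (hxn : m + 1 ≤ (L.length : Int)) :
    (L.drop (pvCnt L m)).takeWhile (fun v => v == m + 1) =
      ((pvSmall (L.length : Int) L).dropWhile (fun v => decide (v ≤ m))).takeWhile
        (fun v => v == m + 1) := by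
  set P : Int → Bool := fun v => decide (1 ≤ v ∧ v ≤ (L.length : Int)) with hP
  set S := pvSmall (L.length : Int) L with hSdef
  set q : Int → Bool := fun v => decide (v ≤ m) with hq
  have hSpair : S.Pairwise (· ≤ ·) := small_pairwise L hL
  have hfil : S.filter q = S.takeWhile q := sorted_filter_eq_takeWhile S hSpair m
  have hLsplit : S ++ L.dropWhile P = L := by
    rw [hSdef, pvSmall_eq_takeWhile, hP]
    exact List.takeWhile_append_dropWhile
  have hcnt : pvCnt L m = (S.filter q).length := rfl
  have hlen_le : (S.filter q).length ≤ S.length := by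
    rw [hfil]; exact (List.takeWhile_sublist _).length_le
  have hdropS : S.drop (S.filter q).length = S.dropWhile q := by
    rw [hfil]
    have h := List.drop_left' (l₁ := S.takeWhile q) (l₂ := S.dropWhile q)
      (i := (S.takeWhile q).length) rfl
    rw [List.takeWhile_append_dropWhile] at h
    exact h
  have hdropL : L.drop (pvCnt L m) = S.dropWhile q ++ L.dropWhile P := by
    rw [hcnt, ← hLsplit, List.drop_append_of_le_length hlen_le, hdropS, hLsplit]
  rw [hdropL, List.takeWhile_append]
  split
  · rename_i hfull
    have heq : (S.dropWhile q).takeWhile (fun v => v == m + 1) = S.dropWhile q :=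
      (List.takeWhile_prefix _).eq_of_length hfull
    have hR : (L.dropWhile P).takeWhile (fun v => v == m + 1) = [] := by
      cases hRc : L.dropWhile P with
      | nil => rfl
      | cons r R' =>
        have hhead := List.head?_dropWhile_not P L
        rw [hRc] at hhead
        simp only [List.head?_cons] at hhead
        have hr : ¬ (1 ≤ r ∧ r ≤ (L.length : Int)) := by
          intro hcl; rw [hP] at hhead; simp [hcl] at hhead
        apply List.takeWhile_cons_of_neg
        simp only [beq_iff_eq]
        intro hre
        exact hr (by omega)
    rw [hR, heq, List.append_nil]
  · rfl

theorem outer_fold (L : List Int) (hL : L.Pairwise (· ≤ ·)) (k : Int) (hk : -1 ≤ k)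
    (mask : Nat) (hmask : 0 ≤ k → mask = 2 ^ (k.toNat + 1) - 1)
    (mc : List Int)
    (hmc : 0 ≤ k → pvInv (L.length : Int) (min k (pvSmall (L.length : Int) L).sum).toNat
      (pvSmall (L.length : Int) L) mc)
    (m : Nat) (hm : m ≤ L.length) :
    ((PySem.List.pyRange 1 ((m : Int) + 1) 1).foldl (pvBodyA L k mask)
        (List.replicate L.length false, 1, 0)).2.2 = pvCnt L (m : Int) ∧
    ((PySem.List.pyRange 1 ((m : Int) + 1) 1).foldl (pvBodyA L k mask)
        (List.replicate L.length false, 1, 0)).1 =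
      (PySem.List.pyRange 1 ((m : Int) + 1) 1).map (pvFlagB' L k mc) ++
        List.replicate (L.length - m) false ∧
    (0 ≤ k → ∀ t : Nat,
      ((PySem.List.pyRange 1 ((m : Int) + 1) 1).foldl (pvBodyA L k mask)
        (List.replicate L.length false, 1, 0)).2.1.testBit t =
      (decide (t ≤ k.toNat) &&
        pvReach ((pvSmall (L.length : Int) L).filter (fun v => decide (v ≤ (m : Int)))) (t : Int))) := by
  induction m with
  | zero =>
    have hnil : PySem.List.pyRange 1 ((0 : Nat) + 1) 1 = [] := by
      apply PySem.List.pyRange_one_eq_nil; norm_num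
    have hfil : (pvSmall (L.length : Int) L).filter (fun v => decide (v ≤ ((0 : Nat) : Int))) = [] := by
      rw [List.filter_eq_nil_iff]
      intro w hw
      have := small_mem L w hw
      simp only [decide_eq_true_eq]
      omega
    rw [hnil]
    refine ⟨?_, by simp, ?_⟩
    · simp only [List.foldl_nil, pvCnt, hfil, List.length_nil]
    · intro hk0 t
      rw [hfil]
      simp only [List.foldl_nil, testBit_one', pvReach]
      rcases Nat.eq_zero_or_pos t with ht | ht
      · subst ht; simp
      · have h1 : decide (t = 0) = false := by simp; omega
        have h2 : decide ((t : Int) = 0) = false := by simp; omega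
        simp [h1, h2]
  | succ m ih =>
    obtain ⟨hptr, hres, hdp⟩ := ih (by omega)
    set n := L.length with hn
    set S := pvSmall (n : Int) L with hSdef
    set x : Int := (m : Int) + 1 with hxdef
    have hx1 : 1 ≤ x := by omega
    have hxn : x ≤ (n : Int) := by omega
    have hsplit : PySem.List.pyRange 1 (((m + 1 : Nat) : Int) + 1) 1 =
        PySem.List.pyRange 1 ((m : Int) + 1) 1 ++ [x] := by
      push_cast
      exact PySem.List.pyRange_one_succ_right (by omega)
    rw [hsplit, List.foldl_append, List.foldl_cons, List.foldl_nil,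
      List.map_append, List.map_cons, List.map_nil]
    set sA := (PySem.List.pyRange 1 ((m : Int) + 1) 1).foldl (pvBodyA L k mask)
      (List.replicate n false, 1, 0) with hsA
    -- the while loop at step x
    have hrun := whileA_run L x mask n sA.2.1 sA.2.2 (by omega)
    have hrun_eq := run_eq L hL (m : Int) (by omega) (by omega)
    set run := (S.dropWhile (fun v => decide (v ≤ (m : Int)))).takeWhile (fun v => v == x)
      with hrundef
    have hLrun : (L.drop sA.2.2).takeWhile (fun v => v == x) = run := by
      rw [hptr]; exact hrun_eq
    have hrun_mem : ∀ w ∈ run, w = x := by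
      intro w hw
      have := List.mem_takeWhile_imp hw
      simpa using this
    have hfsucc : S.filter (fun v => decide (v ≤ ((m + 1 : Nat) : Int))) =
        S.filter (fun v => decide (v ≤ (m : Int))) ++ run := by
      have h := sorted_filter_succ S (small_pairwise L hL) (m : Int)
      rw [← hxdef] at h
      rw [← hrundef] at h
      rw [show ((m + 1 : Nat) : Int) = x by omega]
      exact h
    have hcnt' : pvCnt L ((m + 1 : Nat) : Int) = pvCnt L (m : Int) + run.length := by
      simp only [pvCnt, ← hSdef, ← hn, hfsucc, List.length_append]
    have hw2 : (pvWhileA L x mask n sA.2.1 sA.2.2).2 = pvCnt L ((m + 1 : Nat) : Int) := by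
      rw [hrun, hLrun, hcnt', hptr]
    have hw1 : 0 ≤ k → ∀ t : Nat, (pvWhileA L x mask n sA.2.1 sA.2.2).1.testBit t =
        (decide (t ≤ k.toNat) &&
          pvReach (S.filter (fun v => decide (v ≤ ((m + 1 : Nat) : Int)))) (t : Int)) := by
      intro hk0
      rw [hrun, hLrun]
      have hfold : run.foldl (fun d (_ : Int) => d ||| ((d <<< x.toNat) &&& mask)) sA.2.1 =
          run.foldl (fun d v => d ||| ((d <<< v.toNat) &&& (2 ^ (k.toNat + 1) - 1))) sA.2.1 := by
        rw [hmask hk0]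
        apply PySem.List.foldl_congr_mem
        intro acc w hw
        rw [hrun_mem w hw]
      rw [hfold, hfsucc]
      exact dpFold_inv k.toNat run (fun w hw => by rw [hrun_mem w hw]; omega)
        _ (fun w hw => (small_mem L w (List.mem_of_mem_filter hw)).1) _ (hdp hk0)
    -- the two flags agree
    have hbig : (n : Int) - S.foldl (fun acc v => if v ≤ x then acc + 1 else acc) 0 =
        (n : Int) - (pvCnt L x : Int) := by
      rw [PySem.List.foldl_ite_add_one (fun v => v ≤ x) S 0]
      simp only [pvCnt, ← hSdef, ← hn, List.countP_eq_length_filter, zero_add]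
    have hcfil : pvCnt L x = pvCnt L ((m + 1 : Nat) : Int) := by
      rw [show ((m + 1 : Nat) : Int) = x by omega]
    have hflag : pvCheckA (pvWhileA L x mask n sA.2.1 sA.2.2).1 k x
        (PySem.List.pyRange 0
          (1 + min ((n : Int) - ((pvWhileA L x mask n sA.2.1 sA.2.2).2 : Int))
            (PySem.Int.floordiv k x)) 1) = pvFlagB' L k mc x := by
      rw [hw2, ← hcfil]
      unfold pvFlagB'
      rw [← hSdef, ← hn, hbig]
      simp only [pvFlagB]
      rcases Int.lt_or_le k 0 with hneg | hpos
      · -- k = -1: both ranges are empty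
        have hk1 : k = -1 := by omega
        have hfd : PySem.Int.floordiv k x = -1 := by
          rw [hk1, PySem.Int.floordiv_eq_iff_of_pos (by omega)]
          constructor <;> omega
        have hcle : (pvCnt L x : Int) ≤ (n : Int) := by
          have : pvCnt L x ≤ S.length := by
            simp only [pvCnt, ← hSdef, ← hn]
            exact List.length_filter_le _ _
          have hSlen : S.length ≤ n := by
            rw [hSdef, pvSmall_eq_takeWhile]
            exact (List.takeWhile_sublist _).length_le
          omega
        have hmin : min ((n : Int) - (pvCnt L x : Int)) (PySem.Int.floordiv k x) = -1 := by
          rw [hfd]; exact min_eq_right (by omega)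
        rw [hmin, show (1 : Int) + -1 = 0 by ring, PySem.List.pyRange_one_eq_nil (by omega)]
        rfl
      · -- k ≥ 0: the table and the bitset read the same reachability
        rw [hcfil]
        exact flag_eq (n : Int) k S (fun w hw => small_mem L w hw) mc hpos (hmc hpos)
          x hx1 hxn _ (hw1 hpos) _
    -- assemble the three conjuncts
    simp only [pvBodyA, ← hn]
    refine ⟨hw2, ?_, fun hk0 t => hw1 hk0 t⟩
    rw [hflag]
    have hidx : (x - 1).toNat = m := by omega
    have hlenres : ((PySem.List.pyRange 1 ((m : Int) + 1) 1).map (pvFlagB' L k mc)).length = m := by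
      rw [List.length_map, PySem.List.length_pyRange_one]
      omega
    have hrep : n - m = (n - (m + 1)) + 1 := by omega
    split
    · rename_i hf
      rw [hres, hidx, List.set_append, hlenres, if_neg (by omega), Nat.sub_self, hrep,
        List.replicate_succ, List.set_cons_zero, hf, hxdef]
      simp only [List.append_assoc, List.cons_append, List.nil_append]
    · rename_i hf
      simp only [Bool.not_eq_true] at hf
      rw [hres, hrep, ← hf, List.replicate_succ, hxdef]
      simp only [List.append_assoc, List.cons_append, List.nil_append]

-- ===== VERDICT (by name: the statement is the Claim_ definition above) =====
theorem subsequenceSumAfterCapping_spec : Claim_equal_subsequenceSumAfterCapping := by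
  intro nums k _ hpre
  unfold Spec_subsequenceSumAfterCapping
  simp only [subsequenceSumAfterCapping, subsequenceSumAfterCapping_alt]
  set L := PySem.List.sorted nums (fun v => v) false with hLdef
  have hL : L.Pairwise (· ≤ ·) := PySem.List.sorted_pairwise nums (fun v => v)
  set S := pvSmall (L.length : Int) L with hS
  set mc := S.foldl (pvRelax ((L.length : Int) + 1))
    ((0 : Int) :: List.replicate (min k S.sum).toNat ((L.length : Int) + 1)) with hmcdef
  have hmc : 0 ≤ k → pvInv (L.length : Int) (min k S.sum).toNat S mc := by
    intro hk0
    have h0 := pvInv_init (L.length : Int) (min k S.sum).toNat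
      (by exact_mod_cast Nat.zero_le L.length)
    have h1 := pvInv_fold (L.length : Int) (min k S.sum).toNat S [] _ h0
      (by simpa using small_pairwise L hL)
      (by simpa using fun w hw => small_mem L w hw)
    simpa using h1
  have hmask : 0 ≤ k → (1 <<< (k + 1).toNat) - 1 = 2 ^ (k.toNat + 1) - 1 := by
    intro h
    rw [Nat.one_shiftLeft, show (k + 1).toNat = k.toNat + 1 by omega]
  obtain ⟨hptr, hres, hdp⟩ := outer_fold L hL k hpre _ hmask mc hmc L.length le_rfl
  rw [hres]
  rw [PySem.List.foldl_append_singleton_eq_map]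
  simp only [pvFlagB', Nat.sub_self, List.replicate_zero, List.append_nil, List.nil_append]
  apply List.map_congr_left
  intro a _
  simp only [pvFlagB']
  rw [← hS]
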